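-- pv_equiv track=rewrite | github.com/CadreAI/parsec_slides_app | backend/python/star/star_spring.py | _requested_star_subjects
-- ===== SOURCE A (Python) =====
-- def _requested_star_subjects(chart_filters):
--     """
--     Return ordered STAR subject labels based on chart_filters.subjects.
--     Supports: Reading, Reading (Spanish), Mathematics.
--     """
--     subjects_filter = (chart_filters or {}).get("subjects") or []
--     if not isinstance(subjects_filter, list) or len(subjects_filter) == 0:
--         return ["Reading", "Mathematics"]
--     norm = [str(s).strip().lower() for s in subjects_filter if s is not None]
--     out = []
--     if any(("reading" in s and "spanish" in s) or ("spanish reading" in s) for s in norm):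
--         out.append("Reading (Spanish)")
--     if any(("reading" in s) or (s == "ela") for s in norm):
--         out.append("Reading")
--     if any(("math" in s) for s in norm):
--         out.append("Mathematics")
--     seen = set()
--     out2 = []
--     for s in out:
--         if s not in seen:
--             seen.add(s)
--             out2.append(s)
--     return out2 or ["Reading", "Mathematics"]
-- ===== SOURCE B (Python) =====
-- def _requested_star_subjects(chart_filters):
--     """Single-pass flag classification, then ordered emission of STAR labels."""
--     subjects = (chart_filters or {}).get("subjects") or []
--     if not isinstance(subjects, list) or not subjects:
--         return ["Reading", "Mathematics"]
--     spanish = reading = math = False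
--     for s in subjects:
--         if s is None:
--             continue
--         t = str(s).strip().lower()
--         if ("reading" in t and "spanish" in t) or "spanish reading" in t:
--             spanish = True
--         if "reading" in t or t == "ela":
--             reading = True
--         if "math" in t:
--             math = True
--     labels = ([Label for Label, flag in (("Reading (Spanish)", spanish),
--                                          ("Reading", reading),
--                                          ("Mathematics", math)) if flag])
--     return labels or ["Reading", "Mathematics"]
-- ===== Notes on version B (the rewrite author's own statement) =====
-- stated objective: simpler
-- what changed: Replaces A's three separate any-scans over the normalized list plus a seen-set deduplication loop with one pass that normalizes each subject once and sets three flags, then emits the labels in fixed order (no dedup needed).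
import Mathlib
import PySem

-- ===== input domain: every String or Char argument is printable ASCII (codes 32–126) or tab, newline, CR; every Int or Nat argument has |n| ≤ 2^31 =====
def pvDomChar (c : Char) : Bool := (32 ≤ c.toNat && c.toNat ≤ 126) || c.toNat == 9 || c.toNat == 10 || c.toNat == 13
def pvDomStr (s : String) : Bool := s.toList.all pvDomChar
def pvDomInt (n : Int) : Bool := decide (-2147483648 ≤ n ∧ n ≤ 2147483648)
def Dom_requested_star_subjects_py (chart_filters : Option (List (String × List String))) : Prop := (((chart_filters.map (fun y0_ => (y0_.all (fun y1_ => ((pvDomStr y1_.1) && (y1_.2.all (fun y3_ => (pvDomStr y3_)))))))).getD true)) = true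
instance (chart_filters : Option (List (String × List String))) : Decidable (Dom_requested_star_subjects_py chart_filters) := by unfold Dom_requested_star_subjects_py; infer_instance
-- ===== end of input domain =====

-- B is simpler: one pass over the subjects setting three flags, then emitting labels in fixed
-- order, instead of A's three any-scans over a pre-normalized list plus a seen-set dedup loop.

-- ===== PORT A =====
-- str(s).strip().lower() (s is always a str here)
def pvNorm (s : String) : String := PySem.Str.lower (PySem.Str.strip s)

def pvSpanishP (s : String) : Bool :=
  (PySem.Str.isIn "reading" s && PySem.Str.isIn "spanish" s) || PySem.Str.isIn "spanish reading" s
def pvReadingP (s : String) : Bool := PySem.Str.isIn "reading" s || s == "ela"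
def pvMathP (s : String) : Bool := PySem.Str.isIn "math" s

def requested_star_subjects_py (chart_filters : Option (List (String × List String))) : List String :=
  -- (chart_filters or {}).get("subjects") or []
  let subjects_filter := ((PySem.Dict.mk (chart_filters.getD [])).get? "subjects").getD []
  -- subjects_filter is always a list here, so only the emptiness guard remains
  if subjects_filter.length = 0 then ["Reading", "Mathematics"]
  else
    let norm := subjects_filter.map pvNorm   -- elements are never None
    let out : List String := []
    let out := if norm.any pvSpanishP then out ++ ["Reading (Spanish)"] else out
    let out := if norm.any pvReadingP then out ++ ["Reading"] else out
    let out := if norm.any pvMathP then out ++ ["Mathematics"] else out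
    -- seen-set dedup loop
    let out2 := (out.foldl
      (fun (acc : PySem.Set String × List String) s =>
        if PySem.Set.contains acc.1 s then acc
        else (PySem.Set.add acc.1 s, acc.2 ++ [s]))
      (PySem.Set.empty, [])).2
    if out2.length = 0 then ["Reading", "Mathematics"] else out2

-- ===== PORT B =====
def requested_star_subjects_py_alt (chart_filters : Option (List (String × List String))) : List String :=
  let subjects := (((chart_filters.getD []).find? (fun p => p.1 == "subjects")).map (·.2)).getD []
  if subjects.length = 0 then ["Reading", "Mathematics"]
  else
    -- one pass: normalize each subject once, accumulate (spanish, reading, math) flags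
    let flags := subjects.foldl
      (fun (f : Bool × Bool × Bool) s =>
        let t := PySem.Str.lower (PySem.Str.strip s)
        (f.1 || ((PySem.Str.isIn "reading" t && PySem.Str.isIn "spanish" t) || PySem.Str.isIn "spanish reading" t),
         f.2.1 || (PySem.Str.isIn "reading" t || t == "ela"),
         f.2.2 || PySem.Str.isIn "math" t))
      (false, false, false)
    let labels :=
      (if flags.1 then ["Reading (Spanish)"] else []) ++
      (if flags.2.1 then ["Reading"] else []) ++
      (if flags.2.2 then ["Mathematics"] else [])
    if labels.length = 0 then ["Reading", "Mathematics"] else labels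

-- ===== PRECONDITION & SPEC =====
def Spec_requested_star_subjects_py (chart_filters : Option (List (String × List String))) (out : List String) : Prop := out = requested_star_subjects_py_alt chart_filters
instance (chart_filters : Option (List (String × List String))) (out : List String) : Decidable (Spec_requested_star_subjects_py chart_filters out) := by unfold Spec_requested_star_subjects_py; infer_instance

-- ===== CLAIM (what is proved, stated in full; the proofs are below) =====
def Claim_equal_requested_star_subjects_py : Prop := ∀ (chart_filters : Option (List (String × List String))), Dom_requested_star_subjects_py chart_filters → Spec_requested_star_subjects_py chart_filters (requested_star_subjects_py chart_filters)

-- ===== LEMMAS AND PROOFS =====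

-- first-match dict lookup equals find? on the association list
theorem pv_lookup_eq (l : List (String × List String)) :
    ((PySem.Dict.mk l).get? "subjects").getD [] =
      ((l.find? (fun p => p.1 == "subjects")).map (·.2)).getD [] := by
  induction l with
  | nil => rfl
  | cons p rest ih =>
    rw [PySem.Dict.get?_mk_cons]
    by_cases h : p.1 == "subjects"
    · simp [h]
    · simp only [List.find?_cons, h]
      simpa [h] using ih

-- B's flag fold computes the disjunction of the three predicates over the list
theorem pv_flags_fold (xs : List String) (f : Bool × Bool × Bool) :
    xs.foldl
      (fun (f : Bool × Bool × Bool) s =>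
        let t := PySem.Str.lower (PySem.Str.strip s)
        (f.1 || ((PySem.Str.isIn "reading" t && PySem.Str.isIn "spanish" t) || PySem.Str.isIn "spanish reading" t),
         f.2.1 || (PySem.Str.isIn "reading" t || t == "ela"),
         f.2.2 || PySem.Str.isIn "math" t)) f =
    (f.1 || xs.any (fun s => pvSpanishP (pvNorm s)),
     f.2.1 || xs.any (fun s => pvReadingP (pvNorm s)),
     f.2.2 || xs.any (fun s => pvMathP (pvNorm s))) := by
  induction xs generalizing f with
  | nil => simp
  | cons x xs ih =>
    simp only [List.foldl_cons, List.any_cons, ih, pvSpanishP, pvReadingP, pvMathP, pvNorm]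
    simp [Bool.or_assoc]

-- ===== VERDICT (by name: the statement is the Claim_ definition above) =====
theorem requested_star_subjects_py_spec : Claim_equal_requested_star_subjects_py := by
  intro cf _
  unfold Spec_requested_star_subjects_py requested_star_subjects_py requested_star_subjects_py_alt
  rw [pv_lookup_eq]
  set xs := (((cf.getD []).find? (fun p => p.1 == "subjects")).map (·.2)).getD [] with hxs
  by_cases h : xs.length = 0
  · simp [h]
  · simp only [h, if_false, pv_flags_fold, Bool.false_or]
    rw [List.any_map, List.any_map, List.any_map]
    cases h1 : xs.any (fun s => pvSpanishP (pvNorm s)) <;>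
    cases h2 : xs.any (fun s => pvReadingP (pvNorm s)) <;>
    cases h3 : xs.any (fun s => pvMathP (pvNorm s)) <;>
      simp [Function.comp_def, h1, h2, h3, PySem.Set.contains, PySem.Set.add, PySem.Set.empty]
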